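-- pv_equiv track=rewrite | github.com/Extrieve/HackerRank-Python | def count_teams.py | numTeams1
-- ===== SOURCE A (Python) =====
-- def numTeams1(rating):
--     asc = dsc = 0
--     for i, v in enumerate(rating):
--         llc = rgc = lgc = rlc = 0
--         for l in rating[:i]:
--             if l < v:
--                 llc += 1
--             if l > v:
--                 lgc += 1
--         for r in rating[i+1:]:
--             if r > v:
--                 rgc += 1
--             if r < v:
--                 rlc += 1
--         asc += llc * rgc
--         dsc += lgc * rlc
--     return asc + dsc
-- ===== SOURCE B (Python) =====
-- def _bisect_left(a, x):
--     lo, hi = 0, len(a)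
--     while lo < hi:
--         mid = (lo + hi) // 2
--         if a[mid] < x:
--             lo = mid + 1
--         else:
--             hi = mid
--     return lo
--
-- def _bisect_right(a, x):
--     lo, hi = 0, len(a)
--     while lo < hi:
--         mid = (lo + hi) // 2
--         if x < a[mid]:
--             hi = mid
--         else:
--             lo = mid + 1
--     return lo
--
-- def numTeams1(rating):
--     n = len(rating)
--     all_sorted = sorted(rating)
--     left = []
--     asc = dsc = 0
--     for j, v in enumerate(rating):
--         ll = _bisect_left(left, v)
--         lg = j - _bisect_right(left, v)
--         rl = _bisect_left(all_sorted, v) - ll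
--         rg = (n - _bisect_right(all_sorted, v)) - lg
--         asc += ll * rg
--         dsc += lg * rl
--         left.insert(_bisect_right(left, v), v)
--     return asc + dsc
-- ===== Notes on version B (the rewrite author's own statement) =====
-- stated objective: faster
-- what changed: Instead of rescanning the whole list around each element, B sorts the list once and maintains a growing sorted prefix, getting all four counts per element from hand-written binary searches (left counts from the sorted prefix, right counts by subtracting them from global counts).
import Mathlib
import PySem

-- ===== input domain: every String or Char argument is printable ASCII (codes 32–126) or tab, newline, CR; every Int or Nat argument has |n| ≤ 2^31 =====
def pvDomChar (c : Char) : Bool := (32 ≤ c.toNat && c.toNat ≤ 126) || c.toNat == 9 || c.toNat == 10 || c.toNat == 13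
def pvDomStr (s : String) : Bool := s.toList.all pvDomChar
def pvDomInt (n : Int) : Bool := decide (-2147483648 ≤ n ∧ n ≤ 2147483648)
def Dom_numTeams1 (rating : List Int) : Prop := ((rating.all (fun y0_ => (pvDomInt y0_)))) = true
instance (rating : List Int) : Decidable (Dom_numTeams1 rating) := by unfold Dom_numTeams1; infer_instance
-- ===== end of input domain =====

-- B replaces A's per-element rescans of the whole list by one global sort plus a growing
-- sorted prefix queried with hand-written binary searches (objective: faster).

-- ===== PORT A =====
-- literal transliteration of A: outer loop over enumerate(rating); per element two inner
-- scans, over rating[:i] counting (llc, lgc) and over rating[i+1:] counting (rgc, rlc)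
def aStep (rating : List Int) (s : Int × Int) (iv : Int × Int) : Int × Int :=
  let i := iv.1
  let v := iv.2
  let lc := (PySem.List.slice rating none (some i)).foldl
    (fun (c : Int × Int) l =>
      (if l < v then c.1 + 1 else c.1, if l > v then c.2 + 1 else c.2)) (0, 0)
  let rc := (PySem.List.slice rating (some (i + 1)) none).foldl
    (fun (c : Int × Int) r =>
      (if r > v then c.1 + 1 else c.1, if r < v then c.2 + 1 else c.2)) (0, 0)
  (s.1 + lc.1 * rc.1, s.2 + lc.2 * rc.2)

def numTeams1 (rating : List Int) : Int :=
  let st := (PySem.List.enumerate rating).foldl (aStep rating) (0, 0)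
  st.1 + st.2

-- ===== PORT B =====
-- Source B hand-writes bisect_left/bisect_right (module A imports nothing, so `bisect` was not
-- available to B); the while-loop is ported as structural recursion on a fuel that starts at
-- a.length = hi - lo and strictly decreases each iteration, so fuel never runs out; the
-- in-range read a[mid] is ported as getD (exact: mid < hi ≤ a.length whenever the loop runs).
def bisectLeftLoopB (a : List Int) (x : Int) : Nat → Nat → Nat → Nat
  | 0, lo, _ => lo
  | fuel + 1, lo, hi =>
    if lo < hi then
      if a.getD ((lo + hi) / 2) 0 < x then bisectLeftLoopB a x fuel ((lo + hi) / 2 + 1) hi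
      else bisectLeftLoopB a x fuel lo ((lo + hi) / 2)
    else lo

def bisectLeftB (a : List Int) (x : Int) : Nat :=
  bisectLeftLoopB a x a.length 0 a.length

def bisectRightLoopB (a : List Int) (x : Int) : Nat → Nat → Nat → Nat
  | 0, lo, _ => lo
  | fuel + 1, lo, hi =>
    if lo < hi then
      if x < a.getD ((lo + hi) / 2) 0 then bisectRightLoopB a x fuel lo ((lo + hi) / 2)
      else bisectRightLoopB a x fuel ((lo + hi) / 2 + 1) hi
    else lo

def bisectRightB (a : List Int) (x : Int) : Nat :=
  bisectRightLoopB a x a.length 0 a.length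

-- loop body of Source B's single pass: s = (asc, dsc, left sorted prefix), jv = (j, v)
def bStep (n : Nat) (allSorted : List Int) (s : Int × Int × List Int) (jv : Int × Int) :
    Int × Int × List Int :=
  let j := jv.1
  let v := jv.2
  let left := s.2.2
  let ll : Int := (bisectLeftB left v : Nat)
  let lg : Int := j - (bisectRightB left v : Nat)
  let rl : Int := ((bisectLeftB allSorted v : Nat) : Int) - ll
  let rg : Int := ((n : Int) - (bisectRightB allSorted v : Nat)) - lg
  (s.1 + ll * rg, s.2.1 + lg * rl,
    PySem.List.insert left ((bisectRightB left v : Nat) : Int) v)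

-- transliteration of Source B's numTeams1: sort once, then one pass keeping `left` = sorted prefix
def numTeams1_alt (rating : List Int) : Int :=
  let n := rating.length
  let allSorted := PySem.List.sorted rating (fun x => x)
  let st := (PySem.List.enumerate rating).foldl (bStep n allSorted) (0, 0, [])
  st.1 + st.2.1

-- ===== PRECONDITION & SPEC =====
def Spec_numTeams1 (rating : List Int) (out : Int) : Prop := out = numTeams1_alt rating
instance (rating : List Int) (out : Int) : Decidable (Spec_numTeams1 rating out) := by unfold Spec_numTeams1; infer_instance

-- ===== CLAIM (what is proved, stated in full; the proofs are below) =====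
def Claim_equal_numTeams1 : Prop := ∀ (rating : List Int), Dom_numTeams1 rating → Spec_numTeams1 rating (numTeams1 rating)

-- ===== LEMMAS AND PROOFS =====

-- reference: summed contributions per middle element, with `pre` the already-seen prefix
def refGo : List Int → List Int → Int × Int
  | _, [] => (0, 0)
  | pre, v :: rest =>
    let r := refGo (pre ++ [v]) rest
    ((pre.countP (fun y => decide (y < v)) : Int) * (rest.countP (fun y => decide (v < y)) : Int) + r.1,
     (pre.countP (fun y => decide (v < y)) : Int) * (rest.countP (fun y => decide (y < v)) : Int) + r.2)

-- a list that is split by predicate p into a satisfying r-prefix and a failing suffix has countP p = r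
lemma countP_split (a : List Int) (p : Int → Bool) (r : Nat) (hr : r ≤ a.length)
    (h1 : ∀ (i : Nat) (h : i < a.length), i < r → p a[i])
    (h2 : ∀ (i : Nat) (h : i < a.length), r ≤ i → ¬ p a[i]) :
    a.countP p = r := by
  conv_lhs => rw [← List.take_append_drop r a]
  rw [List.countP_append]
  have ht : (List.take r a).countP p = r := by
    rw [List.countP_eq_length.mpr]
    · simp [Nat.min_eq_left hr]
    · intro x hx
      obtain ⟨i, hi, rfl⟩ := List.mem_iff_getElem.mp hx
      have hi' : i < r ∧ i < a.length := by simpa using hi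
      rw [List.getElem_take]
      exact h1 i hi'.2 hi'.1
  have hd : (List.drop r a).countP p = 0 := by
    rw [List.countP_eq_zero.mpr]
    intro x hx
    obtain ⟨i, hi, rfl⟩ := List.mem_iff_getElem.mp hx
    have hi' : r + i < a.length := by simp at hi; omega
    rw [List.getElem_drop]
    exact h2 (r + i) hi' (by omega)
  omega

lemma bisectLeftLoopB_split (a : List Int) (x : Int) (hs : a.Pairwise (· ≤ ·)) :
    ∀ (fuel lo hi : Nat), hi - lo ≤ fuel → lo ≤ hi → hi ≤ a.length →
    (∀ (i : Nat) (h : i < a.length), i < lo → a[i] < x) →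
    (∀ (i : Nat) (h : i < a.length), hi ≤ i → ¬ a[i] < x) →
    bisectLeftLoopB a x fuel lo hi ≤ a.length ∧
      (∀ (i : Nat) (h : i < a.length), i < bisectLeftLoopB a x fuel lo hi → a[i] < x) ∧
      (∀ (i : Nat) (h : i < a.length), bisectLeftLoopB a x fuel lo hi ≤ i → ¬ a[i] < x) := by
  have hpg := List.pairwise_iff_getElem.mp hs
  intro fuel
  induction fuel with
  | zero =>
    intro lo hi hf hlh hle h1 h2
    have : lo = hi := by omega
    subst this
    exact ⟨by simpa [bisectLeftLoopB] using hle,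
      by simpa [bisectLeftLoopB] using h1, by simpa [bisectLeftLoopB] using h2⟩
  | succ fuel ih =>
    intro lo hi hf hlh hle h1 h2
    rw [bisectLeftLoopB]
    by_cases hcase : lo < hi
    · have hmidlt : (lo + hi) / 2 < a.length := by omega
      rw [if_pos hcase, List.getD_eq_getElem a 0 hmidlt]
      by_cases hv : a[(lo + hi) / 2] < x
      · rw [if_pos hv]
        refine ih ((lo + hi) / 2 + 1) hi (by omega) (by omega) hle ?_ h2
        intro i h hi'
        rcases Nat.lt_or_ge i lo with h' | h'
        · exact h1 i h h'
        · rcases Nat.lt_or_ge i ((lo + hi) / 2) with h'' | h''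
          · exact lt_of_le_of_lt (hpg i _ h hmidlt h'') hv
          · have : i = (lo + hi) / 2 := by omega
            subst this; exact hv
      · rw [if_neg hv]
        refine ih lo ((lo + hi) / 2) (by omega) (by omega) (by omega) h1 ?_
        intro i h hi' hix
        rcases Nat.lt_or_ge ((lo + hi) / 2) i with h'' | h''
        · exact hv (lt_of_le_of_lt (hpg _ i hmidlt h h'') hix)
        · have : i = (lo + hi) / 2 := by omega
          subst this; exact hv hix
    · have : lo = hi := by omega
      subst this
      exact ⟨by simpa [if_neg hcase] using hle,
        by simpa [if_neg hcase] using h1, by simpa [if_neg hcase] using h2⟩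

lemma bisectRightLoopB_split (a : List Int) (x : Int) (hs : a.Pairwise (· ≤ ·)) :
    ∀ (fuel lo hi : Nat), hi - lo ≤ fuel → lo ≤ hi → hi ≤ a.length →
    (∀ (i : Nat) (h : i < a.length), i < lo → a[i] ≤ x) →
    (∀ (i : Nat) (h : i < a.length), hi ≤ i → ¬ a[i] ≤ x) →
    bisectRightLoopB a x fuel lo hi ≤ a.length ∧
      (∀ (i : Nat) (h : i < a.length), i < bisectRightLoopB a x fuel lo hi → a[i] ≤ x) ∧
      (∀ (i : Nat) (h : i < a.length), bisectRightLoopB a x fuel lo hi ≤ i → ¬ a[i] ≤ x) := by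
  have hpg := List.pairwise_iff_getElem.mp hs
  intro fuel
  induction fuel with
  | zero =>
    intro lo hi hf hlh hle h1 h2
    have : lo = hi := by omega
    subst this
    exact ⟨by simpa [bisectRightLoopB] using hle,
      by simpa [bisectRightLoopB] using h1, by simpa [bisectRightLoopB] using h2⟩
  | succ fuel ih =>
    intro lo hi hf hlh hle h1 h2
    rw [bisectRightLoopB]
    by_cases hcase : lo < hi
    · have hmidlt : (lo + hi) / 2 < a.length := by omega
      rw [if_pos hcase, List.getD_eq_getElem a 0 hmidlt]
      by_cases hv : x < a[(lo + hi) / 2]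
      · rw [if_pos hv]
        refine ih lo ((lo + hi) / 2) (by omega) (by omega) (by omega) h1 ?_
        intro i h hi' hix
        rcases Nat.lt_or_ge ((lo + hi) / 2) i with h'' | h''
        · exact absurd (le_trans (hpg _ i hmidlt h h'') hix) (not_le.mpr hv)
        · have : i = (lo + hi) / 2 := by omega
          subst this; exact absurd hix (not_le.mpr hv)
      · rw [if_neg hv]
        refine ih ((lo + hi) / 2 + 1) hi (by omega) (by omega) hle ?_ h2
        intro i h hi'
        rcases Nat.lt_or_ge i lo with h' | h'
        · exact h1 i h h'
        · rcases Nat.lt_or_ge i ((lo + hi) / 2) with h'' | h''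
          · exact le_trans (hpg i _ h hmidlt h'') (not_lt.mp hv)
          · have : i = (lo + hi) / 2 := by omega
            subst this; exact not_lt.mp hv
    · have : lo = hi := by omega
      subst this
      exact ⟨by simpa [if_neg hcase] using hle,
        by simpa [if_neg hcase] using h1, by simpa [if_neg hcase] using h2⟩

lemma bisectLeftB_count (a : List Int) (x : Int) (hs : a.Pairwise (· ≤ ·)) :
    bisectLeftB a x = a.countP (fun y => decide (y < x)) := by
  obtain ⟨hle, h1, h2⟩ := bisectLeftLoopB_split a x hs a.length 0 a.length
    (by omega) (by omega) (by omega) (by omega) (by intro i h hi; omega)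
  exact (countP_split a _ _ hle (by simpa using h1) (by simpa using h2)).symm

lemma bisectRightB_split (a : List Int) (x : Int) (hs : a.Pairwise (· ≤ ·)) :
    bisectRightB a x ≤ a.length ∧
      (∀ (i : Nat) (h : i < a.length), i < bisectRightB a x → a[i] ≤ x) ∧
      (∀ (i : Nat) (h : i < a.length), bisectRightB a x ≤ i → ¬ a[i] ≤ x) :=
  bisectRightLoopB_split a x hs a.length 0 a.length
    (by omega) (by omega) (by omega) (by omega) (by intro i h hi; omega)

lemma bisectRightB_count (a : List Int) (x : Int) (hs : a.Pairwise (· ≤ ·)) :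
    bisectRightB a x = a.countP (fun y => decide (y ≤ x)) := by
  obtain ⟨hle, h1, h2⟩ := bisectRightB_split a x hs
  exact (countP_split a _ _ hle (by simpa using h1) (by simpa using h2)).symm

-- A's inner scans count with a pair of conditional increments
lemma pairCountLeft (v : Int) (l : List Int) (c : Int × Int) :
    l.foldl (fun (c : Int × Int) y =>
        (if y < v then c.1 + 1 else c.1, if y > v then c.2 + 1 else c.2)) c
      = (c.1 + (l.countP (fun y => decide (y < v)) : Int),
         c.2 + (l.countP (fun y => decide (v < y)) : Int)) := by
  induction l generalizing c with
  | nil => simp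
  | cons y l ih =>
    simp only [List.foldl_cons, ih, List.countP_cons, gt_iff_lt]
    rcases lt_trichotomy y v with h | h | h
    · simp [h, asymm h, Prod.ext_iff]
      omega
    · subst h
      simp
    · simp [h, asymm h, Prod.ext_iff]
      omega

lemma pairCountRight (v : Int) (l : List Int) (c : Int × Int) :
    l.foldl (fun (c : Int × Int) y =>
        (if y > v then c.1 + 1 else c.1, if y < v then c.2 + 1 else c.2)) c
      = (c.1 + (l.countP (fun y => decide (v < y)) : Int),
         c.2 + (l.countP (fun y => decide (y < v)) : Int)) := by
  induction l generalizing c with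
  | nil => simp
  | cons y l ih =>
    simp only [List.foldl_cons, ih, List.countP_cons, gt_iff_lt]
    rcases lt_trichotomy y v with h | h | h
    · simp [h, asymm h, Prod.ext_iff]
      omega
    · subst h
      simp
    · simp [h, asymm h, Prod.ext_iff]
      omega

lemma A_fold (pre rest : List Int) (s : Int × Int) :
    (PySem.List.enumerate rest (pre.length : Int)).foldl (aStep (pre ++ rest)) s
    = (s.1 + (refGo pre rest).1, s.2 + (refGo pre rest).2) := by
  induction rest generalizing pre s with
  | nil => simp [refGo]
  | cons v rest ih =>
    rw [PySem.List.enumerate_cons, List.foldl_cons]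
    have hsl : PySem.List.slice (pre ++ v :: rest) none (some (pre.length : Int)) = pre := by
      rw [PySem.List.slice_to_natCast, List.take_left]
    have hsr : PySem.List.slice (pre ++ v :: rest) (some ((pre.length : Int) + 1)) none = rest := by
      have h1 : (pre.length : Int) + 1 = ((pre.length + 1 : Nat) : Int) := by push_cast; ring
      rw [h1, PySem.List.slice_from_natCast]
      have h2 : pre ++ v :: rest = (pre ++ [v]) ++ rest := by simp
      rw [h2]
      have h3 : pre.length + 1 = (pre ++ [v]).length := by simp
      rw [h3, List.drop_left]
    have hstep : aStep (pre ++ v :: rest) s ((pre.length : Int), v)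
        = (s.1 + (pre.countP (fun y => decide (y < v)) : Int) * (rest.countP (fun y => decide (v < y)) : Int),
           s.2 + (pre.countP (fun y => decide (v < y)) : Int) * (rest.countP (fun y => decide (y < v)) : Int)) := by
      simp only [aStep, hsl, hsr, pairCountLeft, pairCountRight, zero_add]
    rw [hstep]
    have harr : pre ++ v :: rest = (pre ++ [v]) ++ rest := by simp
    have hstart : (pre.length : Int) + 1 = (((pre ++ [v]).length : Nat) : Int) := by
      simp
    rw [harr, hstart, ih]
    simp only [refGo, Prod.mk.injEq]
    constructor <;> ring

lemma mem_take_le (a : List Int) (r : Nat) (x v : Int)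
    (h1 : ∀ (i : Nat) (h : i < a.length), i < r → a[i] ≤ v)
    (hx : x ∈ List.take r a) : x ≤ v := by
  obtain ⟨i, hi, rfl⟩ := List.mem_iff_getElem.mp hx
  have hi' : i < r ∧ i < a.length := by simpa using hi
  rw [List.getElem_take]
  exact h1 i hi'.2 hi'.1

lemma mem_drop_gt (a : List Int) (r : Nat) (x v : Int)
    (h2 : ∀ (i : Nat) (h : i < a.length), r ≤ i → ¬ a[i] ≤ v)
    (hx : x ∈ List.drop r a) : v < x := by
  obtain ⟨i, hi, rfl⟩ := List.mem_iff_getElem.mp hx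
  have hi' : r + i < a.length := by simp at hi; omega
  rw [List.getElem_drop]
  exact lt_of_not_ge (h2 (r + i) hi' (by omega))

lemma B_fold (rating : List Int) : ∀ (rest pre left : List Int) (s1 s2 : Int),
    rating = pre ++ rest → left.Pairwise (· ≤ ·) → left.Perm pre →
    ∃ l' : List Int,
      (PySem.List.enumerate rest (pre.length : Int)).foldl
        (bStep rating.length (PySem.List.sorted rating (fun x => x))) (s1, s2, left)
      = (s1 + (refGo pre rest).1, s2 + (refGo pre rest).2, l') := by
  have hsortAll : (PySem.List.sorted rating (fun x => x)).Pairwise (· ≤ ·) :=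
    PySem.List.sorted_pairwise rating (fun x => x)
  have hpermAll : (PySem.List.sorted rating (fun x => x)).Perm rating :=
    PySem.List.sorted_perm rating (fun x => x) false
  intro rest
  induction rest with
  | nil =>
    intro pre left s1 s2 hsplit hsort hperm
    exact ⟨left, by simp [refGo]⟩
  | cons v rest ih =>
    intro pre left s1 s2 hsplit hsort hperm
    rw [PySem.List.enumerate_cons, List.foldl_cons]
    -- counts coming out of the binary searches, as Nat equations
    have hll : bisectLeftB left v = pre.countP (fun y => decide (y < v)) := by
      rw [bisectLeftB_count left v hsort, hperm.countP_eq]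
    have hbr : bisectRightB left v = pre.countP (fun y => decide (y ≤ v)) := by
      rw [bisectRightB_count left v hsort, hperm.countP_eq]
    have hlenpre : left.length = pre.length := hperm.length_eq
    have hsplitCnt : ∀ p : Int → Bool,
        rating.countP p = pre.countP p + (if p v then 1 else 0) + rest.countP p := by
      intro p; rw [hsplit, List.countP_append, List.countP_cons]; omega
    have hblAll : bisectLeftB (PySem.List.sorted rating (fun x => x)) v
        = pre.countP (fun y => decide (y < v)) + rest.countP (fun y => decide (y < v)) := by
      rw [bisectLeftB_count _ v hsortAll, hpermAll.countP_eq, hsplitCnt]; simp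
    have hbrAll : bisectRightB (PySem.List.sorted rating (fun x => x)) v
        = pre.countP (fun y => decide (y ≤ v)) + 1 + rest.countP (fun y => decide (y ≤ v)) := by
      rw [bisectRightB_count _ v hsortAll, hpermAll.countP_eq, hsplitCnt]; simp
    -- complements
    have hcompPre : pre.length = pre.countP (fun y => decide (y ≤ v)) + pre.countP (fun y => decide (v < y)) := by
      rw [List.length_eq_countP_add_countP (fun y => decide (y ≤ v))]
      congr 1
      apply List.countP_congr
      intro x _
      simp
    have hcompRest : rest.length = rest.countP (fun y => decide (y ≤ v)) + rest.countP (fun y => decide (v < y)) := by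
      rw [List.length_eq_countP_add_countP (fun y => decide (y ≤ v))]
      congr 1
      apply List.countP_congr
      intro x _
      simp
    have hlenAll : rating.length = pre.length + 1 + rest.length := by
      rw [hsplit]; simp; omega
    -- the four Int-level factors appearing in bStep
    have hfacll : ((bisectLeftB left v : Nat) : Int) = (pre.countP (fun y => decide (y < v)) : Int) := by
      exact_mod_cast congrArg (Nat.cast : Nat → Int) hll
    have hfaclg : (pre.length : Int) - ((bisectRightB left v : Nat) : Int)
        = (pre.countP (fun y => decide (v < y)) : Int) := by omega
    have hfacrl : ((bisectLeftB (PySem.List.sorted rating (fun x => x)) v : Nat) : Int)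
          - ((bisectLeftB left v : Nat) : Int)
        = (rest.countP (fun y => decide (y < v)) : Int) := by omega
    have hfacrg : ((rating.length : Nat) : Int) - ((bisectRightB (PySem.List.sorted rating (fun x => x)) v : Nat) : Int)
          - ((pre.length : Int) - ((bisectRightB left v : Nat) : Int))
        = (rest.countP (fun y => decide (v < y)) : Int) := by omega
    -- the new sorted prefix
    obtain ⟨hbrle, hbr1, hbr2⟩ := bisectRightB_split left v hsort
    have hins : PySem.List.insert left ((bisectRightB left v : Nat) : Int) v
        = List.take (bisectRightB left v) left ++ v :: List.drop (bisectRightB left v) left :=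
      PySem.List.insert_natCast left (bisectRightB left v) v hbrle
    set left' := List.take (bisectRightB left v) left ++ v :: List.drop (bisectRightB left v) left with hleft'
    have hsort' : left'.Pairwise (· ≤ ·) := by
      rw [hleft', List.pairwise_append]
      refine ⟨List.Pairwise.sublist (List.take_sublist _ _) hsort, ?_, ?_⟩
      · rw [List.pairwise_cons]
        exact ⟨fun y hy => le_of_lt (mem_drop_gt left _ y v hbr2 hy),
          List.Pairwise.sublist (List.drop_sublist _ _) hsort⟩
      · intro x hx b hb
        have hxv : x ≤ v := mem_take_le left _ x v hbr1 hx
        rcases List.mem_cons.mp hb with rfl | hb'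
        · exact hxv
        · exact le_trans hxv (le_of_lt (mem_drop_gt left _ b v hbr2 hb'))
    have hperm' : left'.Perm (pre ++ [v]) := by
      have h1 : left'.Perm (v :: left) := by
        rw [hleft']
        have hp : (List.take (bisectRightB left v) left ++ v :: List.drop (bisectRightB left v) left).Perm
            (v :: (List.take (bisectRightB left v) left ++ List.drop (bisectRightB left v) left)) :=
          List.perm_middle
        rwa [List.take_append_drop] at hp
      have h2 : (v :: left).Perm (v :: pre) := hperm.cons v
      have h3 : (v :: pre).Perm (pre ++ [v]) := by simpa using (List.perm_middle (l₁ := pre) (l₂ := ([] : List Int))).symm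
      exact (h1.trans h2).trans h3
    have hstep : bStep rating.length (PySem.List.sorted rating (fun x => x))
          (s1, s2, left) ((pre.length : Int), v)
        = (s1 + (pre.countP (fun y => decide (y < v)) : Int) * (rest.countP (fun y => decide (v < y)) : Int),
           s2 + (pre.countP (fun y => decide (v < y)) : Int) * (rest.countP (fun y => decide (y < v)) : Int),
           left') := by
      simp only [bStep]
      rw [hfacrg, hfacrl, hfaclg, hfacll, hins]
    rw [hstep]
    have hsplit' : rating = (pre ++ [v]) ++ rest := by rw [hsplit]; simp
    have hstart : (pre.length : Int) + 1 = (((pre ++ [v]).length : Nat) : Int) := by simp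
    rw [hstart]
    obtain ⟨l', hl'⟩ := ih (pre ++ [v]) left'
      (s1 + (pre.countP (fun y => decide (y < v)) : Int) * (rest.countP (fun y => decide (v < y)) : Int))
      (s2 + (pre.countP (fun y => decide (v < y)) : Int) * (rest.countP (fun y => decide (y < v)) : Int))
      hsplit' hsort' hperm'
    refine ⟨l', ?_⟩
    rw [hl']
    simp only [refGo, Prod.mk.injEq]
    refine ⟨by ring, by ring, trivial⟩

-- ===== VERDICT (by name: the statement is the Claim_ definition above) =====
theorem numTeams1_spec : Claim_equal_numTeams1 := by
  intro rating _
  unfold Spec_numTeams1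
  obtain ⟨l', hB⟩ := B_fold rating rating [] [] 0 0 (by simp) List.Pairwise.nil (List.Perm.refl [])
  have hA := A_fold [] rating (0, 0)
  exact (congrArg (fun p : Int × Int => p.1 + p.2) hA).trans
    (congrArg (fun p : Int × Int × List Int => p.1 + p.2.1) hB).symm
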